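-- pv_equiv track=rewrite | github.com/IgnasiLucas/hedgehog | results/2018-12-15/vcf2bgc.py | MakePopDict
-- ===== SOURCE A (Python) =====
-- def MakePopDict(popmap):
--    '''Creates a dictionary with population name as key and a list of sample names as value.'''
--    table = {}
--    for line in popmap:
--       if not line.startswith('#'):
--          (sample, population) = line.split()
--          try:
--             table[population].append(sample)
--          except KeyError:
--             table[population] = [sample]
--    return table
-- ===== SOURCE B (Python) =====
-- def MakePopDict(popmap):
--    '''Creates a dictionary with population name as key and a list of sample names as value.'''
--    pairs = []
--    for line in popmap:
--       if not line.startswith('#'):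
--          (sample, population) = line.split()
--          pairs.append((population, sample))
--    pops = list(dict.fromkeys(p for p, _ in pairs))
--    return {p: [s for q, s in pairs if q == p] for p in pops}
-- ===== Notes on version B (the rewrite author's own statement) =====
-- stated objective: alternative
-- what changed: Replaces the incremental dict-with-try/except grouping by a two-phase decomposition: first parse the non-comment lines into (population, sample) pairs, then build the result declaratively as a dict comprehension over the first-occurrence-ordered population names, collecting each population's samples by a filtering comprehension.
import Mathlib
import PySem

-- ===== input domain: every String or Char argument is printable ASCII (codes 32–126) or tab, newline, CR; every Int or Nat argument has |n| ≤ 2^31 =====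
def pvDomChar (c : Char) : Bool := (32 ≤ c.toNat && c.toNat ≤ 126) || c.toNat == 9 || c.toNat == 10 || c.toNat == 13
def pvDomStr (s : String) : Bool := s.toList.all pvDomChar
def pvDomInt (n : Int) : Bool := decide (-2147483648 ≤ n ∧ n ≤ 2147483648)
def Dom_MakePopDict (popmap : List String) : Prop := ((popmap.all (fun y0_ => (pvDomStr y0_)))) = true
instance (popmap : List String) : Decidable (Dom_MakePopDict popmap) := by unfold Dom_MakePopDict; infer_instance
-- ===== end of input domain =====

-- B replaces the incremental try/except dict build by a two-phase parse-then-group decomposition (objective: alternative).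

-- ===== PORT A =====
-- the loop body: skip '#'-lines, unpack line.split() into (sample, population), append to table[population]
def MakePopDictStepA (d : PySem.Dict String (List String)) (line : String) : PySem.Dict String (List String) :=
  if PySem.Str.startswith line "#" then d
  else
    match PySem.Str.split₀ line with
    | [sample, population] => d.modify population [] (· ++ [sample])
    | _ => d   -- unreachable under Pre_ (Python raises ValueError here)

def MakePopDict (popmap : List String) : List (String × List String) :=
  (popmap.foldl MakePopDictStepA PySem.Dict.empty).items

-- ===== PORT B =====
-- phase 1: the parsing loop collecting (population, sample) pairs
def MakePopDictPairs (popmap : List String) : List (String × String) :=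
  popmap.foldl (fun pairs line =>
    if PySem.Str.startswith line "#" then pairs
    else
      match PySem.Str.split₀ line with
      | [sample, population] => pairs ++ [(population, sample)]
      | _ => pairs   -- unreachable under Pre_
    ) []

-- phase 2: list(dict.fromkeys(...)) then the dict comprehension
def MakePopDict_alt (popmap : List String) : List (String × List String) :=
  let pairs := MakePopDictPairs popmap
  let pops := PySem.List.dedup (pairs.map (·.1))
  pops.map (fun p => (p, (pairs.filter (fun q => q.1 == p)).map (·.2)))

-- ===== PRECONDITION & SPEC =====
-- Pre_ excludes exactly the inputs where Python A raises ValueError: a non-comment line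
-- whose split() does not yield exactly two whitespace-separated fields.
def Pre_MakePopDict (popmap : List String) : Prop :=
  ∀ line ∈ popmap, PySem.Str.startswith line "#" = false → (PySem.Str.split₀ line).length = 2
instance (popmap : List String) : Decidable (Pre_MakePopDict popmap) := by unfold Pre_MakePopDict; infer_instance

def pvWitness_MakePopDict : List String := ["#header", "s1 P2", "s2\tP1", "s3 P2"]

def Spec_MakePopDict (popmap : List String) (out : List (String × List String)) : Prop := out = MakePopDict_alt popmap
instance (popmap : List String) (out : List (String × List String)) : Decidable (Spec_MakePopDict popmap out) := by unfold Spec_MakePopDict; infer_instance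

-- ===== CLAIM (what is proved, stated in full; the proofs are below) =====
def Claim_equal_MakePopDict : Prop := ∀ (popmap : List String), Dom_MakePopDict popmap → Pre_MakePopDict popmap → Spec_MakePopDict popmap (MakePopDict popmap)


-- ===== LEMMAS AND PROOFS =====

-- the per-line contribution: [] for comments/bad lines, one (population, sample) pair otherwise
def pvLinePair (line : String) : List (String × String) :=
  if PySem.Str.startswith line "#" then []
  else
    match PySem.Str.split₀ line with
    | [sample, population] => [(population, sample)]
    | _ => []

theorem pairs_eq_flatMap (popmap : List String) :
    MakePopDictPairs popmap = popmap.flatMap pvLinePair := by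
  have hstep : (fun (pairs : List (String × String)) (line : String) =>
      if PySem.Str.startswith line "#" then pairs
      else match PySem.Str.split₀ line with
        | [sample, population] => pairs ++ [(population, sample)]
        | _ => pairs)
      = (fun pairs line => pairs ++ pvLinePair line) := by
    funext pairs line
    unfold pvLinePair
    split_ifs with h
    · simp
    · cases hs : PySem.Str.split₀ line with
      | nil => simp
      | cons a t =>
        cases t with
        | nil => simp
        | cons b t2 =>
          cases t2 with
          | nil => simp
          | cons c t3 => simp
  rw [MakePopDictPairs, hstep, PySem.List.foldl_append_eq_flatMap]
  simp

theorem foldl_stepA_eq (popmap : List String) (d : PySem.Dict String (List String)) :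
    popmap.foldl MakePopDictStepA d
      = (popmap.flatMap pvLinePair).foldl
          (fun d p => d.modify p.1 [] (fun x => x ++ [p.2])) d := by
  induction popmap generalizing d with
  | nil => rfl
  | cons line rest ih =>
    have hline : MakePopDictStepA d line
        = (pvLinePair line).foldl (fun d p => d.modify p.1 [] (fun x => x ++ [p.2])) d := by
      unfold MakePopDictStepA pvLinePair
      split_ifs with h
      · rfl
      · cases hs : PySem.Str.split₀ line with
        | nil => rfl
        | cons a t =>
          cases t with
          | nil => rfl
          | cons b t2 =>
            cases t2 with
            | nil => rfl
            | cons c t3 => rfl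
    simp only [List.foldl_cons, List.flatMap_cons, List.foldl_append, hline, ih]

theorem set_update_nil {α : Type} [BEq α] (l : List α) :
    PySem.Set.update ([] : PySem.Set α) l = PySem.Set.ofList l := by
  rw [PySem.Set.update, PySem.Set.ofList_eq_foldl]

-- ===== VERDICT (by name: the statement is the Claim_ definition above) =====
theorem MakePopDict_spec : Claim_equal_MakePopDict := by
  intro popmap _hdom _hpre
  unfold Spec_MakePopDict MakePopDict MakePopDict_alt
  rw [foldl_stepA_eq, ← pairs_eq_flatMap]
  set P := MakePopDictPairs popmap with hP
  have hnd : ((P.foldl (fun d p => d.modify p.1 [] (fun x => x ++ [p.2])) PySem.Dict.empty)).keys.Nodup :=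
    PySem.Dict.nodup_keys_foldl_modify_key P Prod.fst [] (fun _ p v => v ++ [p.2])
      PySem.Dict.empty PySem.Dict.nodup_keys_empty
  rw [PySem.Dict.items_eq_map_keys _ hnd []]
  rw [PySem.Dict.keys_foldl_modify_key P]
  rw [PySem.Dict.keys_empty, set_update_nil]
  simp only [PySem.List.dedup_eq_ofList]
  refine List.map_congr_left (fun k _hk => ?_)
  rw [PySem.Dict.getD_foldl_modify_append P PySem.Dict.empty k]
  simp [PySem.Dict.getD_empty]
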